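-- pv_equiv track=rewrite | github.com/codygeary/ROAD | bin/Dragon_python/trace_common.py | build_pair_map_from_structure
-- ===== SOURCE A (Python) =====
-- from typing import Dict, List, Optional, Tuple
--
-- def build_pair_map_from_structure(structure: str) -> List[int]:
--     """Build an array where pair_map[i] = j means i pairs with j (0-indexed)."""
--     n = len(structure)
--     pair_map = list(range(n))
--     bracket_stack: Dict[str, List[int]] = {'(': [], '[': []}
--
--     for idx, ch in enumerate(structure):
--         if ch == '(':
--             bracket_stack['('].append(idx)
--         elif ch == ')':
--             if bracket_stack['(']:
--                 partner = bracket_stack['('].pop()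
--                 pair_map[idx] = partner
--                 pair_map[partner] = idx
--         elif ch == '[':
--             bracket_stack['['].append(idx)
--         elif ch == ']':
--             if bracket_stack['[']:
--                 partner = bracket_stack['['].pop()
--                 pair_map[idx] = partner
--                 pair_map[partner] = idx
--
--     return pair_map
-- ===== SOURCE B (Python) =====
-- def _pair_pass(structure, open_ch, close_ch, pair_map):
--     """One full scan matching a single bracket type with a plain list stack."""
--     stack = []
--     for idx, ch in enumerate(structure):
--         if ch == open_ch:
--             stack.append(idx)
--         elif ch == close_ch:
--             if stack:
--                 partner = stack.pop()
--                 pair_map[idx] = partner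
--                 pair_map[partner] = idx
--     return pair_map
--
--
-- def build_pair_map_from_structure(structure: str) -> list:
--     pair_map = list(range(len(structure)))
--     _pair_pass(structure, '(', ')', pair_map)
--     _pair_pass(structure, '[', ']', pair_map)
--     return pair_map
-- ===== Notes on version B (the rewrite author's own statement) =====
-- stated objective: alternative
-- what changed: One interleaved scan with a dict of two stacks is replaced by a reusable single-bracket-type matcher run as two independent full scans (one for round brackets, one for square brackets), which agree with A because the two bracket types touch disjoint index sets.
import Mathlib
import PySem

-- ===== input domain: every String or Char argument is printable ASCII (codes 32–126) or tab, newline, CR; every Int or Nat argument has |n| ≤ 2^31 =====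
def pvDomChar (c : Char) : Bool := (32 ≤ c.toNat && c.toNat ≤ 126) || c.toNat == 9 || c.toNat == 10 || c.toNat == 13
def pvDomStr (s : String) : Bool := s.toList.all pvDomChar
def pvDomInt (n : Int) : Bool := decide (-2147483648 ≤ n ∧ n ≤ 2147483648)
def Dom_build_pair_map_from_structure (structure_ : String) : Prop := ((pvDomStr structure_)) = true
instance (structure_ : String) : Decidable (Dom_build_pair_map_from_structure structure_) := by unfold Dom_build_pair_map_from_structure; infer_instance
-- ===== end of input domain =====

-- B is an alternative of the same cost: instead of A's single interleaved scan with a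
-- dict of two stacks, B runs one generic single-bracket-type matcher twice, as two
-- independent full scans (for '()' then for '[]').

-- ===== PORT A =====
-- A's single for-loop: state = pair_map + the two stacks of bracket_stack
-- (stacks as cons-lists: Python's append/pop on the same end = push/pop at the head).
def pvALoop (pm : List Int) (sp sb : List Nat) (l : List Char) (i : Nat) : List Int :=
  match l with
  | [] => pm
  | ch :: rest =>
    if ch = '(' then pvALoop pm (i :: sp) sb rest (i+1)
    else if ch = ')' then
      match sp with
      | p :: sp' => pvALoop ((pm.set i (p : Int)).set p (i : Int)) sp' sb rest (i+1)
      | [] => pvALoop pm sp sb rest (i+1)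
    else if ch = '[' then pvALoop pm sp (i :: sb) rest (i+1)
    else if ch = ']' then
      match sb with
      | p :: sb' => pvALoop ((pm.set i (p : Int)).set p (i : Int)) sp sb' rest (i+1)
      | [] => pvALoop pm sp sb rest (i+1)
    else pvALoop pm sp sb rest (i+1)

def build_pair_map_from_structure (structure_ : String) : List Int :=
  pvALoop ((List.range structure_.length).map Int.ofNat) [] [] structure_.toList 0

-- ===== PORT B =====
-- B's helper _pair_pass: one scan matching a single bracket type with one stack.
def pvPairPass (o c : Char) (pm : List Int) (st : List Nat) (l : List Char) (i : Nat) : List Int :=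
  match l with
  | [] => pm
  | ch :: rest =>
    if ch = o then pvPairPass o c pm (i :: st) rest (i+1)
    else if ch = c then
      match st with
      | p :: st' => pvPairPass o c ((pm.set i (p : Int)).set p (i : Int)) st' rest (i+1)
      | [] => pvPairPass o c pm st rest (i+1)
    else pvPairPass o c pm st rest (i+1)

def build_pair_map_from_structure_alt (structure_ : String) : List Int :=
  pvPairPass '[' ']'
    (pvPairPass '(' ')' ((List.range structure_.length).map Int.ofNat) [] structure_.toList 0)
    [] structure_.toList 0

-- ===== PRECONDITION & SPEC =====
def Spec_build_pair_map_from_structure (structure_ : String) (out : List Int) : Prop := out = build_pair_map_from_structure_alt structure_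
instance (structure_ : String) (out : List Int) : Decidable (Spec_build_pair_map_from_structure structure_ out) := by unfold Spec_build_pair_map_from_structure; infer_instance

-- ===== CLAIM (what is proved, stated in full; the proofs are below) =====
def Claim_equal_build_pair_map_from_structure : Prop := ∀ (structure_ : String), Dom_build_pair_map_from_structure structure_ → Spec_build_pair_map_from_structure structure_ (build_pair_map_from_structure structure_)

-- ===== LEMMAS AND PROOFS =====

-- A paren pass commutes with setting a cell j that lies strictly before the scan
-- position and is not on the stack: the pass never writes to such a j.
lemma pvPairPass_set_comm (o c : Char) :
    ∀ (l : List Char) (i : Nat) (pm : List Int) (st : List Nat) (j : Nat) (v : Int),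
      j < i → j ∉ st →
      pvPairPass o c (pm.set j v) st l i = (pvPairPass o c pm st l i).set j v := by
  intro l
  induction l with
  | nil => intro i pm st j v _ _; simp [pvPairPass]
  | cons ch rest ih =>
    intro i pm st j v hji hjst
    by_cases ho : ch = o
    · simp only [pvPairPass, if_pos ho]
      exact ih (i+1) pm (i :: st) j v (by omega)
        (by simp; exact ⟨by omega, hjst⟩)
    · by_cases hc : ch = c
      · simp only [pvPairPass, if_neg ho, if_pos hc]
        cases st with
        | nil => exact ih (i+1) pm [] j v (by omega) (by simp)
        | cons p st' =>
          have hjp : j ≠ p := by intro h; exact hjst (h ▸ List.mem_cons_self)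
          have hji' : j ≠ i := by omega
          show pvPairPass o c (((pm.set j v).set i (p : Int)).set p (i : Int)) st' rest (i+1) =
            (pvPairPass o c ((pm.set i (p : Int)).set p (i : Int)) st' rest (i+1)).set j v
          rw [List.set_comm _ _ hji', List.set_comm _ _ hjp]
          exact ih (i+1) _ st' j v (by omega)
            (fun h => hjst (List.mem_cons_of_mem _ h))
      · simp only [pvPairPass, if_neg ho, if_neg hc]
        exact ih (i+1) pm st j v (by omega) hjst

-- Main invariant: A's interleaved loop equals B's bracket pass applied after B's
-- paren pass, provided all stacked indices lie before the scan position and the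
-- two stacks are disjoint.
lemma pvALoop_eq_two_passes :
    ∀ (l : List Char) (i : Nat) (pm : List Int) (sp sb : List Nat),
      (∀ x ∈ sp, x < i) → (∀ x ∈ sb, x < i) → (∀ x ∈ sb, x ∉ sp) →
      pvALoop pm sp sb l i =
        pvPairPass '[' ']' (pvPairPass '(' ')' pm sp l i) sb l i := by
  intro l
  induction l with
  | nil => intro i pm sp sb _ _ _; simp [pvALoop, pvPairPass]
  | cons ch rest ih =>
    intro i pm sp sb hsp hsb hdisj
    by_cases h1 : ch = '('
    · subst h1
      simp only [pvALoop, pvPairPass]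
      norm_num
      exact ih (i+1) pm (i :: sp) sb
        (by intro x hx; rcases List.mem_cons.mp hx with h | h; omega; exact (hsp x h).trans (by omega))
        (fun x hx => (hsb x hx).trans (by omega))
        (by intro x hx; simp; exact ⟨by have := hsb x hx; omega, hdisj x hx⟩)
    · by_cases h2 : ch = ')'
      · subst h2
        simp only [pvALoop, pvPairPass, if_neg h1]
        norm_num
        cases sp with
        | nil => exact ih (i+1) pm [] sb (by simp) (fun x hx => (hsb x hx).trans (by omega)) (by simp)
        | cons p sp' =>
          exact ih (i+1) _ sp' sb
            (fun x hx => (hsp x (List.mem_cons_of_mem _ hx)).trans (by omega))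
            (fun x hx => (hsb x hx).trans (by omega))
            (fun x hx h => hdisj x hx (List.mem_cons_of_mem _ h))
      · by_cases h3 : ch = '['
        · subst h3
          simp only [pvALoop, pvPairPass, if_neg h1, if_neg h2]
          norm_num
          exact ih (i+1) pm sp (i :: sb)
            (fun x hx => (hsp x hx).trans (by omega))
            (by intro x hx; rcases List.mem_cons.mp hx with h | h; omega; exact (hsb x h).trans (by omega))
            (by intro x hx; rcases List.mem_cons.mp hx with h | h
                · subst h; intro hmem; have := hsp x hmem; omega
                · exact hdisj x h)
        · by_cases h4 : ch = ']'
          · subst h4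
            simp only [pvALoop, pvPairPass, if_neg h1, if_neg h2, if_neg h3]
            cases sb with
            | nil => exact ih (i+1) pm sp [] (fun x hx => (hsp x hx).trans (by omega)) (by simp) (by simp)
            | cons p sb' =>
              have hpi : p < i := hsb p List.mem_cons_self
              have hpsp : p ∉ sp := hdisj p List.mem_cons_self
              show pvALoop ((pm.set i (p : Int)).set p (i : Int)) sp sb' rest (i+1) =
                pvPairPass '[' ']' (((pvPairPass '(' ')' pm sp rest (i+1)).set i (p : Int)).set p (i : Int)) sb' rest (i+1)
              rw [ih (i+1) ((pm.set i (p : Int)).set p (i : Int)) sp sb'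
                    (fun x hx => (hsp x hx).trans (by omega))
                    (fun x hx => (hsb x (List.mem_cons_of_mem _ hx)).trans (by omega))
                    (fun x hx => hdisj x (List.mem_cons_of_mem _ hx))]
              rw [pvPairPass_set_comm '(' ')' rest (i+1) _ sp p (i : Int) (by omega) hpsp]
              rw [pvPairPass_set_comm '(' ')' rest (i+1) pm sp i (p : Int) (by omega)
                    (fun h => absurd (hsp i h) (by omega))]
          · simp only [pvALoop, pvPairPass, if_neg h1, if_neg h2, if_neg h3, if_neg h4]
            norm_num
            exact ih (i+1) pm sp sb
              (fun x hx => (hsp x hx).trans (by omega))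
              (fun x hx => (hsb x hx).trans (by omega))
              hdisj

-- ===== VERDICT (by name: the statement is the Claim_ definition above) =====
theorem build_pair_map_from_structure_spec : Claim_equal_build_pair_map_from_structure := by
  intro s _
  unfold Spec_build_pair_map_from_structure build_pair_map_from_structure build_pair_map_from_structure_alt
  exact pvALoop_eq_two_passes s.toList 0 _ [] [] (by simp) (by simp) (by simp)
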